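-- pv_equiv track=rewrite | github.com/yasmine1222/Election-Project | voting.py | least_votes
-- ===== SOURCE A (Python) =====
-- def count_appearances(element, l):
--     """Counts the number of times that element appears in list l.
--
--     >>> count_appearances('Eve', ['Abe', 'Eve', 'Fred', 'Eve', 'Eve'])
--     3
--     >>> count_appearances('Fred', ['Abe', 'Eve', 'Fred', 'Eve', 'Eve'])
--     1
--     >>> count_appearances('Rohit', ['Abe', 'Eve', 'Fred', 'Eve', 'Eve'])
--     0
--     """
--     #we define an empty variable which we will keep accumulating values to
--     count = 0
--     for n in l:
--         if n == element:
--             count = count+1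
--     return count
--
-- def least_votes(candidates, votes):
--     """Computes the names of the candidates who appeared the least number of times.
--
--     Put doctests here
--     >>> least_votes(['med', 'tima', 'yas'], ['yas', 'tima','tima'])
--     ['med']
--     >>> least_votes(['ghali', 'hamza', 'yas', 'yas'], ['yas', 'ghali'])
--     ['hamza']
--     """
--     #we use a variable that we will compare our count to
--     least_votes= len(votes)
--     #we use an empty list that will take the names of the candidates
--     least_name = []
--     #we use a for loop that will go over every element
--     for name in candidates:
--         count  = count_appearances(name, votes)
--         if count < least_votes:
--             least_votes = count
--             least_name = [name]
--         elif count == least_votes: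
--             if name not in least_name :
--
--                 least_name = least_name + [name]
--
--     return least_name
-- ===== SOURCE B (Python) =====
-- def least_votes(candidates, votes):
--     counts = {}
--     for v in votes:
--         counts[v] = counts.get(v, 0) + 1
--     if not candidates:
--         return []
--     m = min(counts.get(c, 0) for c in candidates)
--     result = []
--     for c in candidates:
--         if counts.get(c, 0) == m and c not in result:
--             result.append(c)
--     return result
-- ===== Notes on version B (the rewrite author's own statement) =====
-- stated objective: faster
-- what changed: Replaces A's single pass with a running minimum, list resets and a per-candidate rescan of votes by a vote tally built once, a separate minimum computation, and a filter pass collecting distinct candidates at that minimum.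
import Mathlib
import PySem

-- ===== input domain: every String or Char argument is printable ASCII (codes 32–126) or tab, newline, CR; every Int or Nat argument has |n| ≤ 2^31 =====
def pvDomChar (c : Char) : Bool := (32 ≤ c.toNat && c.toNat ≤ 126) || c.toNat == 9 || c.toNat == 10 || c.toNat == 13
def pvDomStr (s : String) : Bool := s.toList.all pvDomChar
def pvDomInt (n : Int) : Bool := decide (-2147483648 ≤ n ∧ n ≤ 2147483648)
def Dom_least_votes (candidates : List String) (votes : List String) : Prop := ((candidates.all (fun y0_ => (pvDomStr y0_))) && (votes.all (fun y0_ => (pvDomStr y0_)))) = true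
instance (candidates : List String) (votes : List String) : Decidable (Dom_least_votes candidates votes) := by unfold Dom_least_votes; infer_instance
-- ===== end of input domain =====

-- B replaces A's single running-minimum pass (which rescans votes per candidate) by a tally built once, a minimum pass, and a filter pass.


-- ===== PORT A =====
def count_appearances (element : String) (l : List String) : Int :=
  l.foldl (fun count n => if n = element then count + 1 else count) 0

def least_votes (candidates : List String) (votes : List String) : List String :=
  (candidates.foldl
    (fun (st : Int × List String) name =>
      let count := count_appearances name votes
      if count < st.1 then (count, [name])
      else if count = st.1 then (if name ∈ st.2 then st else (st.1, st.2 ++ [name]))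
      else st)
    ((votes.length : Int), [])).2

-- ===== PORT B =====
def least_votes_alt (candidates : List String) (votes : List String) : List String :=
  let counts := votes.foldl (fun d x => d.insert x (d.getD x 0 + 1)) (PySem.Dict.empty : PySem.Dict String Int)
  match candidates with
  | [] => []
  | c :: rest =>
    let m := rest.foldl (fun acc x => min acc (counts.getD x 0)) (counts.getD c 0)
    (c :: rest).foldl
      (fun res x => if counts.getD x 0 = m ∧ x ∉ res then res ++ [x] else res) []

-- ===== PRECONDITION & SPEC =====
def Spec_least_votes (candidates : List String) (votes : List String) (out : List String) : Prop := out = least_votes_alt candidates votes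
instance (candidates : List String) (votes : List String) (out : List String) : Decidable (Spec_least_votes candidates votes out) := by unfold Spec_least_votes; infer_instance

-- ===== CLAIM (what is proved, stated in full; the proofs are below) =====
def Claim_equal_least_votes : Prop := ∀ (candidates : List String) (votes : List String), Dom_least_votes candidates votes → Spec_least_votes candidates votes (least_votes candidates votes)

-- ===== LEMMAS AND PROOFS =====

-- count_appearances is List.count
lemma count_appearances_eq (e : String) (l : List String) :
    count_appearances e l = (l.count e : Int) := by
  unfold count_appearances
  suffices h : ∀ acc : Int, l.foldl (fun count n => if n = e then count + 1 else count) acc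
      = acc + (l.count e : Int) by simpa using h 0
  induction l with
  | nil => simp
  | cons x xs ih =>
    intro acc
    simp only [List.foldl_cons, List.count_cons, ih]
    by_cases hx : x = e
    · simp [hx]
      ring
    · simp [hx]

-- running minimum over cs starting from a
def runMin (votes : List String) (cs : List String) (a : Int) : Int :=
  cs.foldl (fun acc c => min acc ((votes.count c : Nat) : Int)) a

-- B's filter pass, abstractly
def sel (votes : List String) (cs : List String) (m : Int) (res : List String) : List String :=
  cs.foldl (fun res x => if ((votes.count x : Nat) : Int) = m ∧ x ∉ res then res ++ [x] else res) res

lemma runMin_le (votes cs : List String) (a : Int) : runMin votes cs a ≤ a := by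
  induction cs generalizing a with
  | nil => simp [runMin]
  | cons c cs ih =>
    simp only [runMin, List.foldl_cons] at *
    exact le_trans (ih _) (min_le_left _ _)

-- characterisation of A's fold
lemma foldA_char (votes : List String) (cs : List String) :
    ∀ (lv : Int) (names : List String),
    cs.foldl
      (fun (st : Int × List String) name =>
        let count := count_appearances name votes
        if count < st.1 then (count, [name])
        else if count = st.1 then (if name ∈ st.2 then st else (st.1, st.2 ++ [name]))
        else st)
      (lv, names)
    = (runMin votes cs lv,
       if runMin votes cs lv < lv then sel votes cs (runMin votes cs lv) []
       else sel votes cs lv names) := by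
  induction cs with
  | nil => intro lv names; simp [runMin, sel]
  | cons c cs ih =>
    intro lv names
    have hg : count_appearances c votes = ((votes.count c : Nat) : Int) := count_appearances_eq c votes
    simp only [List.foldl_cons]
    rcases lt_trichotomy (count_appearances c votes) lv with hlt | heq | hgt
    · rw [if_pos hlt, ih]
      have hM : runMin votes (c :: cs) lv = runMin votes cs (count_appearances c votes) := by
        simp only [runMin, List.foldl_cons]; congr 1; omega
      have hle : runMin votes cs (count_appearances c votes) ≤ count_appearances c votes :=
        runMin_le votes cs _
      rw [hM, if_pos (by omega : runMin votes cs (count_appearances c votes) < lv)]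
      rcases lt_or_eq_of_le hle with h2 | h2
      · rw [if_pos h2]
        have : sel votes (c :: cs) (runMin votes cs (count_appearances c votes)) []
            = sel votes cs (runMin votes cs (count_appearances c votes)) [] := by
          simp only [sel, List.foldl_cons]
          rw [if_neg (by rw [← hg]; simp; omega)]
        rw [this]
      · rw [if_neg (by omega)]
        have : sel votes (c :: cs) (runMin votes cs (count_appearances c votes)) []
            = sel votes cs (runMin votes cs (count_appearances c votes)) [c] := by
          simp only [sel, List.foldl_cons]
          rw [if_pos ⟨by rw [← hg]; omega, by simp⟩]
          simp
        rw [this, h2]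
    · rw [if_neg (by omega), if_pos heq]
      have hM : runMin votes (c :: cs) lv = runMin votes cs lv := by
        simp only [runMin, List.foldl_cons]; congr 1; omega
      have hle : runMin votes cs lv ≤ lv := runMin_le votes cs _
      have hsel1 : ∀ m : Int, m < lv → sel votes (c :: cs) m [] = sel votes cs m [] := by
        intro m hm
        simp only [sel, List.foldl_cons]
        rw [if_neg (by rw [← hg]; simp; omega)]
      by_cases hc : c ∈ names
      · rw [if_pos hc, ih, hM]
        rcases lt_or_eq_of_le hle with h2 | h2
        · rw [if_pos h2, if_pos h2, hsel1 _ h2]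
        · rw [if_neg (by omega), if_neg (by omega)]
          have : sel votes (c :: cs) lv names = sel votes cs lv names := by
            simp only [sel, List.foldl_cons]
            rw [if_neg (by intro h; exact h.2 hc)]
          rw [this]
      · rw [if_neg hc]
        rw [show ((lv, names ++ [c]) : Int × List String) = ((lv, names ++ [c]) : Int × List String) from rfl, ih, hM]
        rcases lt_or_eq_of_le hle with h2 | h2
        · rw [if_pos h2, if_pos h2, hsel1 _ h2]
        · rw [if_neg (by omega), if_neg (by omega)]
          have : sel votes (c :: cs) lv names = sel votes cs lv (names ++ [c]) := by
            simp only [sel, List.foldl_cons]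
            rw [if_pos ⟨by rw [← hg]; omega, hc⟩]
          rw [this]
    · rw [if_neg (by omega), if_neg (by omega), ih]
      have hM : runMin votes (c :: cs) lv = runMin votes cs lv := by
        simp only [runMin, List.foldl_cons]; congr 1; omega
      have hle : runMin votes cs lv ≤ lv := runMin_le votes cs _
      rw [hM]
      rcases lt_or_eq_of_le hle with h2 | h2
      · rw [if_pos h2, if_pos h2]
        have : sel votes (c :: cs) (runMin votes cs lv) [] = sel votes cs (runMin votes cs lv) [] := by
          simp only [sel, List.foldl_cons]
          rw [if_neg (by rw [← hg]; simp; omega)]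
        rw [this]
      · rw [if_neg (by omega), if_neg (by omega)]
        have : sel votes (c :: cs) lv names = sel votes cs lv names := by
          simp only [sel, List.foldl_cons]
          rw [if_neg (by rw [← hg]; simp; omega)]
        rw [this]

-- ===== VERDICT (by name: the statement is the Claim_ definition above) =====
theorem least_votes_spec : Claim_equal_least_votes := by
  intro candidates votes _
  unfold Spec_least_votes least_votes least_votes_alt
  have hcnt : ∀ x : String,
      (votes.foldl (fun d x => d.insert x (d.getD x 0 + 1))
        (PySem.Dict.empty : PySem.Dict String Int)).getD x 0 = ((votes.count x : Nat) : Int) := by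
    intro x
    rw [PySem.Dict.getD_foldl_insert_add_one]
    simp [pysem]
  cases candidates with
  | nil => simp
  | cons c rest =>
    rw [foldA_char]
    have hle : ((votes.count c : Nat) : Int) ≤ (votes.length : Int) := by
      exact_mod_cast List.count_le_length
    have hMeq : runMin votes (c :: rest) (votes.length : Int)
        = rest.foldl (fun acc x => min acc ((votes.count x : Nat) : Int)) ((votes.count c : Nat) : Int) := by
      simp only [runMin, List.foldl_cons]
      congr 1
      omega
    have hMle : runMin votes (c :: rest) (votes.length : Int) ≤ (votes.length : Int) :=
      runMin_le votes _ _
    simp only [hcnt, hMeq.symm]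
    split_ifs with h
    · rfl
    · have h2 : runMin votes (c :: rest) (votes.length : Int) = (votes.length : Int) := by omega
      rw [h2]
      rfl
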